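-- pv_equiv track=rewrite | github.com/jiadaizhao/LintCode | 1801-1900/1812-Rotation Number/1812-Rotation Number.py | RotationNumber
-- ===== SOURCE A (Python) =====
-- def RotationNumber(n):
--     # write your code here
--     result = []
--     def rotate(num, upper):
--         res = ''
--         for c in num:
--             if c == '0' or c == '8':
--                 res += c
--             elif c == '6':
--                 res += '9'
--             elif c == '9':
--                 res += '6'
--             else:
--                 return False
--         return res != num and int(res) <= upper
--     for i in range(6, n + 1):
--         if rotate(str(i), n):
--             result.append(i)
--     return result
-- ===== SOURCE B (Python) =====
-- def RotationNumber(n):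
--     # Enumerate only numbers whose digits are all in {0, 6, 8, 9} (first digit
--     # 6/8/9), level by level (one level per digit count), keeping each value
--     # alongside its per-digit rotation; emit the value when the rotation
--     # differs and is within the bound.  O(4^log10(n)) ~ O(n^0.602) candidates
--     # instead of A's scan of all n numbers.
--     def rot(d):
--         return 9 if d == 6 else 6 if d == 9 else d
--     result = []
--     level = [(d, rot(d)) for d in (6, 8, 9) if d <= n]
--     while level:
--         for val, rv in level:
--             if rv != val and rv <= n:
--                 result.append(val)
--         level = [(val * 10 + d, rv * 10 + rot(d))
--                  for val, rv in level
--                  for d in (0, 6, 8, 9)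
--                  if val * 10 + d <= n]
--     return result
-- ===== Notes on version B (the rewrite author's own statement) =====
-- stated objective: faster
-- what changed: Instead of testing every integer in 6..n with a per-digit string rotation, B generates only the candidates whose digits all lie in {0,6,8,9} (first digit 6/8/9), breadth-first by digit count with the rotated value maintained incrementally and branches pruned at the bound n, so only O(4^log10(n)) ~ O(n^0.602) candidates are ever touched.
import Mathlib
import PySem

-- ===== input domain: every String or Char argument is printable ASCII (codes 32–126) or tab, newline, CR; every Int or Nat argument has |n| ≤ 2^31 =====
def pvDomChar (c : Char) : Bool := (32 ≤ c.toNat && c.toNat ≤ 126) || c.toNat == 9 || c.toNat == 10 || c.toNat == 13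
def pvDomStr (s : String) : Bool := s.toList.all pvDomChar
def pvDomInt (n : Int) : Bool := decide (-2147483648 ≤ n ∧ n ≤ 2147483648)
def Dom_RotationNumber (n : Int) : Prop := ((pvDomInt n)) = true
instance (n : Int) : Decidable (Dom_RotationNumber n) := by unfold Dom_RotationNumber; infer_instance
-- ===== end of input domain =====

-- B enumerates only {0,6,8,9}-digit candidates level by level instead of testing every i in 6..n (faster, asymptotic).

-- ===== PORT A =====
-- `rotate`'s for-loop over the characters of `num`, accumulating `res`;
-- `none` is rotate's early `return False` on any other character.
def rotLoopA : List Char → List Char → Option (List Char)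
  | [], res => some res
  | c :: cs, res =>
    if c = '0' ∨ c = '8' then rotLoopA cs (res ++ [c])
    else if c = '6' then rotLoopA cs (res ++ ['9'])
    else if c = '9' then rotLoopA cs (res ++ ['6'])
    else none

-- int(res), ported by hand as the left-to-right decimal digit fold: every string
-- this function passes to int() is nonempty and consists only of the ASCII digits
-- '0','6','8','9' (res is built from exactly those characters above), and on such
-- strings Python's int(s) is exactly this fold — exact there.  (PySem.Int.ofChars?
-- computes the same values, but its digit loop is a private definition with no
-- accessible equations, so it cannot be reasoned about in the proofs below.)
def intDigitsA (cs : List Char) : Int :=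
  cs.foldl (fun acc c => acc * 10 + ((c.toNat : Int) - 48)) 0

def rotateA (num : List Char) (upper : Int) : Bool :=
  match rotLoopA num [] with
  | none => false
  | some res => decide (res ≠ num) && decide (intDigitsA res ≤ upper)

-- for i in range(6, n + 1): if rotate(str(i), n): result.append(i)
-- (str(i) iterated character by character: PySem.Int.toChars i = (PySem.Int.toStr i).toList)
def RotationNumber (n : Int) : List Int :=
  (PySem.List.pyRange 6 (n + 1) 1).foldl
    (fun result i => if rotateA (PySem.Int.toChars i) n then result ++ [i] else result) []

-- ===== PORT B =====
-- rot(d) = 9 if d == 6 else 6 if d == 9 else d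
def rotDigitB (d : Int) : Int := if d = 6 then 9 else if d = 9 then 6 else d

-- level = [(val*10 + d, rv*10 + rot(d)) for val, rv in level for d in (0, 6, 8, 9) if val*10 + d <= n]
def stepB (n : Int) (level : List (Int × Int)) : List (Int × Int) :=
  level.flatMap (fun p =>
    ([0, 6, 8, 9] : List Int).filterMap (fun d =>
      if p.1 * 10 + d ≤ n then some (p.1 * 10 + d, p.2 * 10 + rotDigitB d) else none))

-- for val, rv in level: if rv != val and rv <= n: result.append(val)
def emitB (n : Int) (level : List (Int × Int)) (result : List Int) : List Int :=
  level.foldl (fun res p => if p.2 ≠ p.1 ∧ p.2 ≤ n then res ++ [p.1] else res) result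

-- the while-loop; `fuel` only makes it total (12 iterations always suffice on the
-- stated domain: level values grow tenfold per iteration and exceed any admitted n)
def loopB (n : Int) : Nat → List (Int × Int) → List Int → List Int
  | 0, _, result => result
  | fuel + 1, level, result =>
    if level.isEmpty then result
    else loopB n fuel (stepB n level) (emitB n level result)

-- level = [(d, rot(d)) for d in (6, 8, 9) if d <= n]
def RotationNumber_alt (n : Int) : List Int :=
  loopB n 12
    (([6, 8, 9] : List Int).filterMap (fun d => if d ≤ n then some (d, rotDigitB d) else none))
    []

-- ===== PRECONDITION & SPEC =====
def Spec_RotationNumber (n : Int) (out : List Int) : Prop := out = RotationNumber_alt n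
instance (n : Int) (out : List Int) : Decidable (Spec_RotationNumber n out) := by unfold Spec_RotationNumber; infer_instance

-- ===== CLAIM (what is proved, stated in full; the proofs are below) =====
def Claim_equal_RotationNumber : Prop := ∀ (n : Int), Dom_RotationNumber n → Spec_RotationNumber n (RotationNumber n)

-- ===== LEMMAS AND PROOFS =====

-- ---- arithmetic characterisation of A's per-number test ----

def okD (d : Int) : Bool := d == 0 || d == 6 || d == 8 || d == 9

def goodB (i : Int) : Bool :=
  if i < 10 then okD i else okD (i % 10) && goodB (i / 10)
termination_by i.toNat
decreasing_by omega

def rotI (i : Int) : Int :=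
  if i < 10 then rotDigitB i else rotI (i / 10) * 10 + rotDigitB (i % 10)
termination_by i.toNat
decreasing_by omega

def swapC (c : Char) : Char := if c = '6' then '9' else if c = '9' then '6' else c

def charOK (c : Char) : Bool := c == '0' || c == '8' || c == '6' || c == '9'

theorem rotLoopA_eq (cs : List Char) : ∀ acc,
    rotLoopA cs acc = if cs.all charOK then some (acc ++ cs.map swapC) else none := by
  induction cs with
  | nil => intro acc; simp [rotLoopA]
  | cons c cs ih =>
    intro acc
    by_cases h0 : c = '0' ∨ c = '8'
    · have hc : charOK c = true := by rcases h0 with h|h <;> simp [charOK, h]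
      have hs : swapC c = c := by rcases h0 with h|h <;> subst h <;> rfl
      rw [List.all_cons, hc]
      simp only [rotLoopA, if_pos h0, ih, List.map_cons, hs, Bool.true_and]
      by_cases hall : cs.all charOK = true <;> simp [hall]
    · by_cases h6 : c = '6'
      · subst h6
        rw [List.all_cons]
        have hc : charOK '6' = true := rfl
        rw [hc]
        simp only [rotLoopA, if_neg h0, if_pos rfl, ih, List.map_cons, Bool.true_and]
        have hs : swapC '6' = '9' := rfl
        rw [hs]
        by_cases hall : cs.all charOK = true <;> simp [hall]
      · by_cases h9 : c = '9'
        · subst h9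
          rw [List.all_cons]
          have hc : charOK '9' = true := rfl
          rw [hc]
          simp only [rotLoopA, if_neg h0, if_neg h6, if_pos rfl, ih, List.map_cons, Bool.true_and]
          have hs : swapC '9' = '6' := rfl
          rw [hs]
          by_cases hall : cs.all charOK = true <;> simp [hall]
        · have hc : charOK c = false := by
            simp only [charOK, Bool.or_eq_false_iff, beq_eq_false_iff_ne, ne_eq]
            exact ⟨⟨⟨fun h => h0 (Or.inl h), fun h => h0 (Or.inr h)⟩, h6⟩, h9⟩
          rw [List.all_cons, hc]
          simp [rotLoopA, if_neg h0, h6, h9]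

theorem intDigitsA_toDigits (m : Nat) : intDigitsA (Nat.toDigits 10 m) = m := by
  induction m using Nat.strong_induction_on with
  | _ m ih =>
    rw [Nat.toDigits_eq_if (by norm_num)]
    by_cases h : m < 10
    · rw [if_pos h]
      interval_cases m <;> decide
    · rw [if_neg h]
      have hd : m / 10 < m := Nat.div_lt_self (by omega) (by omega)
      have h1 := ih (m / 10) hd
      have h2 : m % 10 < 10 := Nat.mod_lt _ (by omega)
      have h3 : ((m % 10).digitChar.toNat : Int) - 48 = (m % 10 : Nat) := by
        interval_cases h : m % 10 <;> decide
      unfold intDigitsA at h1 ⊢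
      rw [List.foldl_append]
      simp only [List.foldl_cons, List.foldl_nil, h1]
      rw [h3]
      have : m = (m / 10) * 10 + m % 10 := (Nat.div_add_mod m 10).symm ▸ by omega
      push_cast
      omega

theorem cast_div10 (m : Nat) : ((m : Int)) / 10 = ((m / 10 : Nat) : Int) := by
  omega
theorem cast_mod10 (m : Nat) : ((m : Int)) % 10 = ((m % 10 : Nat) : Int) := by
  omega

theorem all_charOK_toDigits (m : Nat) : (Nat.toDigits 10 m).all charOK = goodB (m : Int) := by
  induction m using Nat.strong_induction_on with
  | _ m ih =>
    rw [Nat.toDigits_eq_if (by norm_num), goodB]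
    by_cases h : m < 10
    · rw [if_pos h, if_pos (by exact_mod_cast h)]
      interval_cases m <;> decide
    · rw [if_neg h, if_neg (by exact_mod_cast h)]
      rw [List.all_append, ih (m / 10) (Nat.div_lt_self (by omega) (by omega))]
      rw [cast_div10, cast_mod10]
      have h2 : m % 10 < 10 := Nat.mod_lt _ (by omega)
      have h3 : ∀ r : Nat, r < 10 → ([(r).digitChar].all charOK = okD ((r : Nat) : Int)) := by
        intro r hr; interval_cases r <;> decide
      rw [h3 _ h2, Bool.and_comm]


theorem rotI_nonneg (i : Int) : 0 ≤ i → 0 ≤ rotI i := by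
  induction i using rotI.induct with
  | case1 i hi =>
    intro h0
    rw [rotI, if_pos hi]
    unfold rotDigitB
    split_ifs <;> omega
  | case2 i hi ih =>
    intro h0
    rw [rotI, if_neg hi]
    have h1 : 0 ≤ rotI (i / 10) := ih (by omega)
    have h2 : 0 ≤ i % 10 ∧ i % 10 < 10 := by omega
    unfold rotDigitB
    split_ifs <;> omega

theorem rotI_pos (i : Int) : 0 < i → 0 < rotI i := by
  induction i using rotI.induct with
  | case1 i hi =>
    intro h0
    rw [rotI, if_pos hi]
    unfold rotDigitB
    split_ifs <;> omega
  | case2 i hi ih =>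
    intro h0
    have h1 : 0 < rotI (i / 10) := ih (by omega)
    rw [rotI, if_neg hi]
    have h2 : 0 ≤ i % 10 ∧ i % 10 < 10 := by omega
    unfold rotDigitB
    split_ifs <;> omega

theorem map_swap_toDigits (m : Nat) : 0 < m → goodB (m : Int) = true →
    (Nat.toDigits 10 m).map swapC = Nat.toDigits 10 (rotI (m : Int)).toNat := by
  induction m using Nat.strong_induction_on with
  | _ m ih =>
    intro hm hg
    rw [Nat.toDigits_eq_if (by norm_num)]
    by_cases h : m < 10
    · rw [if_pos h, rotI, if_pos (by exact_mod_cast h)]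
      rw [goodB, if_pos (by exact_mod_cast h)] at hg
      interval_cases m <;> simp_all [okD, rotDigitB] <;> decide
    · rw [if_neg h]
      rw [goodB, if_neg (by exact_mod_cast h), cast_div10, cast_mod10] at hg
      have hgq : goodB ((m / 10 : Nat) : Int) = true := by
        rcases Bool.and_eq_true_iff.mp hg with ⟨_, h2⟩; exact h2
      have hok : okD (((m % 10 : Nat)) : Int) = true := by
        rcases Bool.and_eq_true_iff.mp hg with ⟨h1, _⟩; exact h1
      have hq : 0 < m / 10 := Nat.div_pos (by omega) (by omega)
      have ihq := ih (m / 10) (Nat.div_lt_self (by omega) (by omega)) hq hgq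
      rw [List.map_append, ihq]
      -- RHS: rotI m = rotI (m/10) * 10 + rotDigitB (m % 10)
      have hrot : rotI (m : Int) = rotI ((m / 10 : Nat) : Int) * 10 + rotDigitB ((m % 10 : Nat) : Int) := by
        rw [rotI, if_neg (by exact_mod_cast h), cast_div10, cast_mod10]
      have hpos : 0 < rotI ((m / 10 : Nat) : Int) := rotI_pos _ (by exact_mod_cast hq)
      -- digit facts: for r ∈ {0,6,8,9}
      have hr10 : m % 10 < 10 := Nat.mod_lt _ (by omega)
      have hcases : m % 10 = 0 ∨ m % 10 = 6 ∨ m % 10 = 8 ∨ m % 10 = 9 := by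
        simp only [okD, Bool.or_eq_true, beq_iff_eq] at hok
        omega
      have hdig : [(m % 10).digitChar].map swapC = [((rotDigitB ((m % 10 : Nat) : Int)).toNat).digitChar] ∧
          (rotDigitB ((m % 10 : Nat) : Int)).toNat < 10 := by
        rcases hcases with h'|h'|h'|h' <;> rw [h'] <;> exact ⟨by decide, by decide⟩
      rw [hdig.1]
      have happ := Nat.toDigits_append_toDigits (b := 10) (n := (rotI ((m / 10 : Nat) : Int)).toNat)
        (d := (rotDigitB ((m % 10 : Nat) : Int)).toNat) (by norm_num) (by omega) hdig.2
      rw [← Nat.toDigits_of_lt_base hdig.2, happ]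
      congr 1
      have hd0 : 0 ≤ rotDigitB ((m % 10 : Nat) : Int) := by
        rcases hcases with h'|h'|h'|h' <;> rw [h'] <;> decide
      omega

theorem rotateA_eq (i n : Int) (hi : 6 ≤ i) :
    rotateA (PySem.Int.toChars i) n
      = (goodB i && (decide (rotI i ≠ i) && decide (rotI i ≤ n))) := by
  obtain ⟨m, rfl⟩ : ∃ m : Nat, i = (m : Int) := ⟨i.toNat, by omega⟩
  have hm : 0 < m := by omega
  have htc : PySem.Int.toChars (m : Int) = Nat.toDigits 10 m := by
    unfold PySem.Int.toChars
    rw [if_neg (by omega), Int.toNat_natCast]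
  rw [htc]
  unfold rotateA
  by_cases hg : goodB ((m : Int)) = true
  · have hres : [] ++ (Nat.toDigits 10 m).map swapC = Nat.toDigits 10 (rotI (m : Int)).toNat := by
      rw [List.nil_append]; exact map_swap_toDigits m hm hg
    rw [rotLoopA_eq, all_charOK_toDigits, if_pos hg, hres, hg, Bool.true_and]
    dsimp only
    have hrnn : 0 ≤ rotI (m : Int) := rotI_nonneg _ (by omega)
    have hne : (Nat.toDigits 10 (rotI (m : Int)).toNat ≠ Nat.toDigits 10 m) ↔ rotI (m : Int) ≠ (m : Int) := by
      constructor
      · intro h hc; exact h (by rw [hc]; simp)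
      · intro h hc
        have := intDigitsA_toDigits (rotI (m : Int)).toNat
        rw [hc, intDigitsA_toDigits] at this
        exact h (by omega)
    have hval : intDigitsA (Nat.toDigits 10 (rotI (m : Int)).toNat) = rotI (m : Int) := by
      rw [intDigitsA_toDigits]; omega
    rw [hval, decide_eq_decide.mpr hne]
  · rw [rotLoopA_eq, all_charOK_toDigits, if_neg hg, Bool.eq_false_iff.mpr hg, Bool.false_and]

def fullLvl : Nat → List (Int × Int)
  | 0 => [(6, 9), (8, 8), (9, 6)]
  | k + 1 => (fullLvl k).flatMap (fun p =>
      ([0, 6, 8, 9] : List Int).map (fun d => (p.1 * 10 + d, p.2 * 10 + rotDigitB d)))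

theorem fullLvl_facts (k : Nat) : ∀ p ∈ fullLvl k,
    6 * 10 ^ k ≤ p.1 ∧ p.1 < 10 ^ (k + 1) ∧ goodB p.1 = true ∧ p.2 = rotI p.1 := by
  induction k with
  | zero =>
    intro p hp
    simp only [fullLvl, List.mem_cons, List.mem_singleton] at hp
    rcases hp with rfl | rfl | rfl | h
    · refine ⟨by norm_num, by norm_num, by rw [goodB]; norm_num [okD], by rw [rotI]; norm_num [rotDigitB]⟩
    · refine ⟨by norm_num, by norm_num, by rw [goodB]; norm_num [okD], by rw [rotI]; norm_num [rotDigitB]⟩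
    · refine ⟨by norm_num, by norm_num, by rw [goodB]; norm_num [okD], by rw [rotI]; norm_num [rotDigitB]⟩
    · cases h
  | succ k ih =>
    intro p hp
    simp only [fullLvl, List.mem_flatMap, List.mem_map] at hp
    obtain ⟨q, hq, d, hd, rfl⟩ := hp
    obtain ⟨hq1, hq2, hq3, hq4⟩ := ih q hq
    have hP : (0:Int) < 10 ^ k := by positivity
    have hdset : d = 0 ∨ d = 6 ∨ d = 8 ∨ d = 9 := by
      simp only [List.mem_cons, List.mem_singleton] at hd
      tauto
    have hd09 : 0 ≤ d ∧ d < 10 := by rcases hdset with rfl|rfl|rfl|rfl <;> norm_num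
    have h1P : (1:Int) ≤ 10 ^ k := hP
    have hq6 : (6:Int) ≤ q.1 := by nlinarith
    have hmod : (q.1 * 10 + d) % 10 = d := by omega
    have hdiv : (q.1 * 10 + d) / 10 = q.1 := by omega
    refine ⟨?_, ?_, ?_, ?_⟩
    · have : (6:Int) * 10 ^ (k+1) = (6 * 10 ^ k) * 10 := by ring
      rw [this]; nlinarith
    · have : (10:Int) ^ (k+1+1) = 10 ^ (k+1) * 10 := by ring
      rw [this]; nlinarith
    · rw [goodB, if_neg (by omega), hmod, hdiv, hq3, Bool.and_true]
      rcases hdset with rfl|rfl|rfl|rfl <;> rfl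
    · rw [rotI, if_neg (by omega), hmod, hdiv, ← hq4]

theorem fullLvl_complete (k : Nat) : ∀ (i : Int), goodB i = true →
    6 * 10 ^ k ≤ i → i < 10 ^ (k + 1) → (i, rotI i) ∈ fullLvl k := by
  induction k with
  | zero =>
    intro i hg h1 h2
    norm_num at h1 h2
    rw [goodB, if_pos h2] at hg
    have : i = 6 ∨ i = 8 ∨ i = 9 := by
      simp only [okD, Bool.or_eq_true, beq_iff_eq] at hg
      omega
    rcases this with rfl|rfl|rfl <;>
      simp [fullLvl, rotI, rotDigitB]
  | succ k ih =>
    intro i hg h1 h2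
    have hP : (0:Int) < 10 ^ k := by positivity
    have h1P : (1:Int) ≤ 10 ^ k := hP
    have hpow1 : (6:Int) * 10 ^ (k+1) = (6 * 10 ^ k) * 10 := by ring
    have hpow2 : (10:Int) ^ (k+1+1) = 10 ^ (k+1) * 10 := by ring
    have hi10 : ¬ i < 10 := by rw [hpow1] at h1; nlinarith
    rw [goodB, if_neg hi10] at hg
    obtain ⟨hok, hgq⟩ := Bool.and_eq_true_iff.mp hg
    have hd : i % 10 = 0 ∨ i % 10 = 6 ∨ i % 10 = 8 ∨ i % 10 = 9 := by
      simp only [okD, Bool.or_eq_true, beq_iff_eq] at hok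
      omega
    have hq1 : 6 * 10 ^ k ≤ i / 10 := by rw [hpow1] at h1; omega
    have hq2 : i / 10 < 10 ^ (k+1) := by rw [hpow2] at h2; omega
    have hmem := ih (i / 10) hgq hq1 hq2
    simp only [fullLvl, List.mem_flatMap]
    refine ⟨(i / 10, rotI (i / 10)), hmem, ?_⟩
    simp only [List.mem_map, List.mem_cons, List.mem_singleton]
    refine ⟨i % 10, by tauto, ?_⟩
    have : i / 10 * 10 + i % 10 = i := by omega
    rw [this]
    have hri : rotI i = rotI (i / 10) * 10 + rotDigitB (i % 10) := by
      rw [rotI, if_neg hi10]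
    rw [hri]

theorem fullLvl_pairwise (k : Nat) : (fullLvl k).Pairwise (fun p q => p.1 < q.1) := by
  induction k with
  | zero => norm_num [fullLvl]
  | succ k ih =>
    rw [fullLvl, List.flatMap_def, List.pairwise_flatten]
    constructor
    · intro l hl
      simp only [List.mem_map] at hl
      obtain ⟨q, hq, rfl⟩ := hl
      norm_num [List.pairwise_cons]
    · rw [List.pairwise_map]
      apply ih.imp_of_mem
      intro q q' hq hq' hlt
      intro x hx y hy
      simp only [List.mem_map, List.mem_cons, List.mem_singleton] at hx hy
      obtain ⟨d, hd, rfl⟩ := hx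
      obtain ⟨d', hd', rfl⟩ := hy
      have hdb : 0 ≤ d ∧ d < 10 := by rcases hd with rfl|rfl|rfl|rfl|h; · norm_num
                                      · norm_num
                                      · norm_num
                                      · norm_num
                                      · cases h
      have hdb' : 0 ≤ d' ∧ d' < 10 := by rcases hd' with rfl|rfl|rfl|rfl|h; · norm_num
                                         · norm_num
                                         · norm_num
                                         · norm_num
                                         · cases h
      simp only
      omega

theorem fullLvl_ancestor (k : Nat) : ∀ p' ∈ fullLvl (k + 1), ∃ p ∈ fullLvl k, p.1 ≤ p'.1 := by
  intro p' hp
  simp only [fullLvl, List.mem_flatMap, List.mem_map] at hp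
  obtain ⟨q, hq, d, hd, rfl⟩ := hp
  refine ⟨q, hq, ?_⟩
  have hdset : d = 0 ∨ d = 6 ∨ d = 8 ∨ d = 9 := by
    simp only [List.mem_cons, List.mem_singleton] at hd; tauto
  have hq6 := (fullLvl_facts k q hq).1
  have hP0 : (0:Int) < 10 ^ k := by positivity
  have hP : (1:Int) ≤ 10 ^ k := hP0
  have : (6:Int) ≤ q.1 := by nlinarith
  rcases hdset with rfl|rfl|rfl|rfl <;> simp <;> omega

def blockB (n : Int) (k : Nat) : List Int :=
  ((((fullLvl k).filter (fun p => decide (p.1 ≤ n))).filter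
      (fun p => decide (p.2 ≠ p.1 ∧ p.2 ≤ n))).map (·.1))
def Jb (n : Int) : Nat → Nat → List Int
  | 0, _ => []
  | t + 1, k => blockB n k ++ Jb n t (k + 1)

theorem emitB_eq (n : Int) (l : List (Int × Int)) (r : List Int) :
    emitB n l r = r ++ (l.filter (fun p => decide (p.2 ≠ p.1 ∧ p.2 ≤ n))).map (·.1) := by
  unfold emitB
  induction l generalizing r with
  | nil => simp
  | cons p l ih =>
    rw [List.foldl_cons, List.filter_cons]
    by_cases h : p.2 ≠ p.1 ∧ p.2 ≤ n
    · rw [if_pos h, ih, decide_eq_true h]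
      simp
    · rw [if_neg h, ih, decide_eq_false h]
      simp

theorem Jb_nil (n : Int) : ∀ (t k : Nat), (∀ p ∈ fullLvl k, ¬ p.1 ≤ n) → Jb n t k = [] := by
  intro t
  induction t with
  | zero => intro k h; rfl
  | succ t ih =>
    intro k h
    rw [Jb]
    have h0 : (fullLvl k).filter (fun p => decide (p.1 ≤ n)) = [] :=
      List.filter_eq_nil_iff.mpr (fun p hp => by simpa using h p hp)
    have hb : blockB n k = [] := by unfold blockB; rw [h0]; rfl
    rw [hb, List.nil_append]
    apply ih
    intro p' hp'
    obtain ⟨p, hp, hle⟩ := fullLvl_ancestor k p' hp'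
    have := h p hp
    omega

theorem filterMap_if_gen (n : Int) (p : Int × Int) : ∀ ds : List Int,
    (ds.filterMap (fun d =>
      if p.1 * 10 + d ≤ n then some (p.1 * 10 + d, p.2 * 10 + rotDigitB d) else none))
      = (ds.map (fun d => (p.1 * 10 + d, p.2 * 10 + rotDigitB d))).filter
          (fun q => decide (q.1 ≤ n)) := by
  intro ds
  induction ds with
  | nil => rfl
  | cons d ds ih =>
    rw [List.filterMap_cons, List.map_cons, List.filter_cons]
    by_cases h : p.1 * 10 + d ≤ n
    · rw [if_pos h, ih, decide_eq_true (by simpa using h), if_pos rfl]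
    · rw [if_neg h, ih, decide_eq_false (by simpa using h)]
      simp

theorem stepB_filter (n : Int) (k : Nat) :
    stepB n ((fullLvl k).filter (fun p => decide (p.1 ≤ n)))
      = (fullLvl (k + 1)).filter (fun p => decide (p.1 ≤ n)) := by
  have main : ∀ l : List (Int × Int), (∀ p ∈ l, 0 < p.1) →
      stepB n (l.filter (fun p => decide (p.1 ≤ n)))
        = (l.flatMap (fun p => ([0, 6, 8, 9] : List Int).map
            (fun d => (p.1 * 10 + d, p.2 * 10 + rotDigitB d)))).filter (fun p => decide (p.1 ≤ n)) := by
    intro l hl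
    induction l with
    | nil => rfl
    | cons p l ih =>
      have hp0 : 0 < p.1 := hl p (List.mem_cons_self)
      have ihl := ih (fun q hq => hl q (List.mem_cons_of_mem _ hq))
      rw [List.flatMap_cons, List.filter_append, List.filter_cons]
      by_cases h : p.1 ≤ n
      · rw [decide_eq_true h, if_pos rfl]
        unfold stepB
        rw [List.flatMap_cons, filterMap_if_gen]
        unfold stepB at ihl
        rw [ihl]
      · rw [decide_eq_false h]
        simp only [if_neg Bool.false_ne_true]
        rw [ihl]
        have hnil : ((([0, 6, 8, 9] : List Int).map
            (fun d => (p.1 * 10 + d, p.2 * 10 + rotDigitB d))).filter (fun q => decide (q.1 ≤ n))) = [] := by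
          apply List.filter_eq_nil_iff.mpr
          intro q hq
          simp only [List.mem_map, List.mem_cons, List.mem_singleton] at hq
          obtain ⟨d, hd, rfl⟩ := hq
          have hdb : 0 ≤ d := by rcases hd with rfl|rfl|rfl|rfl|h'; · norm_num
                                 · norm_num
                                 · norm_num
                                 · norm_num
                                 · cases h'
          simp only [decide_eq_true_eq]
          omega
        rw [hnil, List.nil_append]
  have hpos : ∀ p ∈ fullLvl k, 0 < p.1 := by
    intro p hp
    have h1 := (fullLvl_facts k p hp).1
    have hP : (0:Int) < 10 ^ k := by positivity
    nlinarith
  rw [main (fullLvl k) hpos]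
  rfl

theorem loopB_eq (n : Int) (hn : n ≤ 2147483648) : ∀ (t k fuel : Nat) (r : List Int),
    k + t = 10 → t ≤ fuel →
    loopB n fuel ((fullLvl k).filter (fun p => decide (p.1 ≤ n))) r = r ++ Jb n t k := by
  intro t
  induction t with
  | zero =>
    intro k fuel r hk _
    have hk10 : k = 10 := by omega
    subst hk10
    have hemp : ∀ p ∈ fullLvl 10, ¬ p.1 ≤ n := by
      intro p hp
      have h1 := (fullLvl_facts 10 p hp).1
      norm_num at h1
      omega
    have h0 : (fullLvl 10).filter (fun p => decide (p.1 ≤ n)) = [] :=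
      List.filter_eq_nil_iff.mpr (fun p hp => by simpa using hemp p hp)
    rw [h0, Jb, List.append_nil]
    cases fuel with
    | zero => rfl
    | succ f => rw [loopB]; norm_num
  | succ t ih =>
    intro k fuel r hk hf
    cases fuel with
    | zero => omega
    | succ f =>
      rw [loopB]
      by_cases hemp : (fullLvl k).filter (fun p => decide (p.1 ≤ n)) = []
      · rw [hemp]; norm_num
        have hJ : Jb n (t+1) k = [] := by
          apply Jb_nil
          intro p hp
          intro hc
          have hmem : p ∈ (fullLvl k).filter (fun p => decide (p.1 ≤ n)) :=
            List.mem_filter.mpr ⟨hp, by simpa using hc⟩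
          rw [hemp] at hmem
          cases hmem
        simp [hJ]
      · rw [if_neg (by simpa [List.isEmpty_iff] using hemp)]
        rw [stepB_filter, emitB_eq, ih (k+1) f _ (by omega) (by omega)]
        rw [Jb]
        unfold blockB
        rw [List.append_assoc]

theorem mem_Jb (n i : Int) : ∀ (t k : Nat), i ∈ Jb n t k ↔ ∃ j < t, i ∈ blockB n (k + j) := by
  intro t
  induction t with
  | zero => intro k; simp [Jb]
  | succ t ih =>
    intro k
    rw [Jb, List.mem_append, ih (k + 1)]
    constructor
    · rintro (h | ⟨j, hj, hm⟩)
      · exact ⟨0, by omega, by simpa using h⟩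
      · exact ⟨j + 1, by omega, by rw [show k + (j+1) = k + 1 + j by omega]; exact hm⟩
    · rintro ⟨j, hj, hm⟩
      cases j with
      | zero => exact Or.inl (by simpa using hm)
      | succ j => exact Or.inr ⟨j, by omega, by rw [show k + 1 + j = k + (j+1) by omega]; exact hm⟩

theorem mem_blockB (n i : Int) (k : Nat) :
    i ∈ blockB n k ↔ (6 * 10 ^ k ≤ i ∧ i < 10 ^ (k + 1) ∧ goodB i = true ∧
      i ≤ n ∧ rotI i ≠ i ∧ rotI i ≤ n) := by
  unfold blockB
  simp only [List.mem_map, List.mem_filter, decide_eq_true_eq]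
  constructor
  · rintro ⟨p, ⟨⟨⟨hp, hle⟩, hc⟩, rfl⟩⟩
    obtain ⟨h1, h2, h3, h4⟩ := fullLvl_facts k p hp
    rw [h4] at hc
    exact ⟨h1, h2, h3, hle, hc.1, hc.2⟩
  · rintro ⟨h1, h2, h3, h4, h5, h6⟩
    exact ⟨(i, rotI i), ⟨⟨⟨fullLvl_complete k i h3 h1 h2, h4⟩, ⟨h5, h6⟩⟩, rfl⟩⟩

theorem good_lower (k : Nat) : ∀ (i : Int), goodB i = true →
    10 ^ k ≤ i → i < 10 ^ (k + 1) → 6 * 10 ^ k ≤ i := by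
  induction k with
  | zero =>
    intro i hg h1 h2
    norm_num at h1 h2 ⊢
    rw [goodB, if_pos h2] at hg
    simp only [okD, Bool.or_eq_true, beq_iff_eq] at hg
    omega
  | succ k ih =>
    intro i hg h1 h2
    have hP : (0:Int) < 10 ^ k := by positivity
    have hpow1 : (10:Int) ^ (k+1) = 10 ^ k * 10 := by ring
    have hpow2 : (10:Int) ^ (k+1+1) = 10 ^ (k+1) * 10 := by ring
    have hi10 : ¬ i < 10 := by nlinarith
    rw [goodB, if_neg hi10] at hg
    obtain ⟨hok, hgq⟩ := Bool.and_eq_true_iff.mp hg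
    have hq := ih (i / 10) hgq (by omega) (by rw [hpow2] at h2; omega)
    have : (6:Int) * 10 ^ (k+1) = (6 * 10 ^ k) * 10 := by ring
    rw [this]
    omega

theorem Jb_lb (n : Int) : ∀ (t k : Nat) (i : Int), i ∈ Jb n t k → 6 * 10 ^ k ≤ i := by
  intro t k i hm
  rw [mem_Jb] at hm
  obtain ⟨j, hj, hb⟩ := hm
  have h := (mem_blockB n i (k + j)).mp hb
  have : (10:Int) ^ k ≤ 10 ^ (k + j) := by
    apply pow_le_pow_right₀ (by norm_num) (by omega)
  nlinarith [h.1]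

theorem Jb_pairwise (n : Int) : ∀ (t k : Nat), (Jb n t k).Pairwise (· < ·) := by
  intro t
  induction t with
  | zero => intro k; simp [Jb]
  | succ t ih =>
    intro k
    rw [Jb, List.pairwise_append]
    refine ⟨?_, ih (k + 1), ?_⟩
    · unfold blockB
      rw [List.pairwise_map]
      exact ((fullLvl_pairwise k).filter _).filter _
    · intro x hx y hy
      have hxk := ((mem_blockB n x k).mp hx).2.1
      have hyk := Jb_lb n t (k + 1) y hy
      have : (10:Int) ^ (k+1) ≤ 6 * 10 ^ (k+1) := by
        have : (0:Int) < 10 ^ (k+1) := by positivity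
        nlinarith
      omega

theorem mem_B (n i : Int) (hn : n ≤ 2147483648) :
    i ∈ Jb n 10 0 ↔ (6 ≤ i ∧ i ≤ n ∧ goodB i = true ∧ rotI i ≠ i ∧ rotI i ≤ n) := by
  rw [mem_Jb]
  constructor
  · rintro ⟨j, hj, hb⟩
    have h := (mem_blockB n i (0 + j)).mp hb
    have hP0 : (0:Int) < 10 ^ (0 + j) := by positivity
    have hP : (1:Int) ≤ 10 ^ (0 + j) := hP0
    exact ⟨by nlinarith [h.1], h.2.2.2.1, h.2.2.1, h.2.2.2.2.1, h.2.2.2.2.2⟩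
  · rintro ⟨h6, hle, hg, hne, hrle⟩
    set k := Nat.log 10 i.toNat with hk
    have hi0 : i.toNat ≠ 0 := by omega
    have h1n : 10 ^ k ≤ i.toNat := Nat.pow_log_le_self 10 hi0
    have h2n : i.toNat < 10 ^ (k + 1) := Nat.lt_pow_succ_log_self (by norm_num) _
    have h1 : (10:Int) ^ k ≤ i := by
      have := h1n
      zify at this
      omega
    have h2 : i < (10:Int) ^ (k + 1) := by
      have := h2n
      zify at this
      omega
    have hklt : k < 10 := by
      by_contra hc
      have : (10:Nat) ^ 10 ≤ 10 ^ k := Nat.pow_le_pow_right (by norm_num) (by omega)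
      have : (10:Nat) ^ 10 ≤ i.toNat := le_trans this h1n
      norm_num at this
      omega
    refine ⟨k, hklt, ?_⟩
    rw [show (0 + k) = k by omega, mem_blockB]
    exact ⟨good_lower k i hg h1 h2, h2, hg, hle, hne, hrle⟩

-- ---- assembling both sides ----

theorem RotationNumber_eq_filter (n : Int) :
    RotationNumber n = (PySem.List.pyRange 6 (n + 1) 1).filter
      (fun i => goodB i && (decide (rotI i ≠ i) && decide (rotI i ≤ n))) := by
  unfold RotationNumber
  rw [PySem.List.foldl_append_if (fun i => rotateA (PySem.Int.toChars i) n) (fun i => i)]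
  rw [List.nil_append, List.map_id']
  exact List.filter_congr (fun i hi => rotateA_eq i n (PySem.List.mem_pyRange_one.mp hi).1)

theorem init_eq (n : Int) :
    (([6, 8, 9] : List Int).filterMap (fun d => if d ≤ n then some (d, rotDigitB d) else none))
      = (fullLvl 0).filter (fun p => decide (p.1 ≤ n)) := by
  simp only [List.filterMap_cons, List.filterMap_nil, fullLvl, List.filter_cons, List.filter_nil]
  norm_num [rotDigitB]
  split_ifs <;> simp_all

theorem alt_eq_Jb (n : Int) (hn : n ≤ 2147483648) : RotationNumber_alt n = Jb n 10 0 := by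
  unfold RotationNumber_alt
  rw [init_eq, loopB_eq n hn 10 0 12 [] rfl (by norm_num), List.nil_append]

-- ===== VERDICT (by name: the statement is the Claim_ definition above) =====
theorem RotationNumber_spec : Claim_equal_RotationNumber := by
  unfold Claim_equal_RotationNumber
  intro n hD
  unfold Spec_RotationNumber
  have hn : n ≤ 2147483648 := by
    unfold Dom_RotationNumber pvDomInt at hD
    simp only [decide_eq_true_eq] at hD
    exact hD.2
  rw [RotationNumber_eq_filter, alt_eq_Jb n hn]
  have hPA : ((PySem.List.pyRange 6 (n + 1) 1).filter
      (fun i => goodB i && (decide (rotI i ≠ i) && decide (rotI i ≤ n)))).Pairwise (· < ·) :=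
    (PySem.List.pairwise_lt_pyRange_one 6 (n + 1)).filter _
  have hPB := Jb_pairwise n 10 0
  have hmem : ∀ a, a ∈ Jb n 10 0 ↔
      a ∈ (PySem.List.pyRange 6 (n + 1) 1).filter
        (fun i => goodB i && (decide (rotI i ≠ i) && decide (rotI i ≤ n))) := by
    intro a
    rw [mem_B n a hn, List.mem_filter, PySem.List.mem_pyRange_one]
    simp only [Bool.and_eq_true, decide_eq_true_eq]
    constructor
    · rintro ⟨h1, h2, h3, h4, h5⟩
      exact ⟨⟨h1, by omega⟩, h3, h4, h5⟩
    · rintro ⟨⟨h1, h2⟩, h3, h4, h5⟩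
      exact ⟨h1, by omega, h3, h4, h5⟩
  have hperm : (Jb n 10 0).Perm ((PySem.List.pyRange 6 (n + 1) 1).filter
      (fun i => goodB i && (decide (rotI i ≠ i) && decide (rotI i ≤ n)))) := by
    rw [List.perm_ext_iff_of_nodup (hPB.imp ne_of_lt) (hPA.imp ne_of_lt)]
    exact hmem
  calc (PySem.List.pyRange 6 (n + 1) 1).filter
        (fun i => goodB i && (decide (rotI i ≠ i) && decide (rotI i ≤ n)))
      = PySem.List.sorted ((PySem.List.pyRange 6 (n + 1) 1).filter
          (fun i => goodB i && (decide (rotI i ≠ i) && decide (rotI i ≤ n)))) (fun x => x) :=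
        (PySem.List.sorted_eq_self_of_pairwise _ _ (hPA.imp fun h => le_of_lt h)).symm
    _ = Jb n 10 0 := PySem.List.sorted_eq_of_perm_of_pairwise_lt _ _ _ hperm hPB
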